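-- pv_equiv track=rewrite | github.com/jacobhamblin/advent-of-code | 2018/02/lib/main.py | has_pair_and_triplet
-- ===== SOURCE A (Python) =====
-- def has_pair_and_triplet(str):
--     chars_seen = {}
--     double_present = 0
--     triple_present = 0
--     for char in str:
--         existing_presence = chars_seen.get(char, 0)
--         chars_seen[char] = existing_presence + 1
--     for key in chars_seen:
--         if chars_seen[key] == 2 and not double_present:
--             double_present = 1
--         if chars_seen[key] == 3 and not triple_present:
--             triple_present = 1
--     return [double_present, triple_present]
-- ===== SOURCE B (Python) =====
-- def has_pair_and_triplet(str):
--     s = sorted(str)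
--     double_present = 0
--     triple_present = 0
--     i = 0
--     n = len(s)
--     while i < n:
--         j = i
--         while j < n and s[j] == s[i]:
--             j += 1
--         run = j - i
--         if run == 2:
--             double_present = 1
--         if run == 3:
--             triple_present = 1
--         i = j
--     return [double_present, triple_present]
-- ===== Notes on version B (the rewrite author's own statement) =====
-- stated objective: alternative
-- what changed: Replaces A's dict-based counting pass plus a key-scan that sets the flags with a sort of the characters followed by a single run-length scan over equal-character runs.
import Mathlib
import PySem

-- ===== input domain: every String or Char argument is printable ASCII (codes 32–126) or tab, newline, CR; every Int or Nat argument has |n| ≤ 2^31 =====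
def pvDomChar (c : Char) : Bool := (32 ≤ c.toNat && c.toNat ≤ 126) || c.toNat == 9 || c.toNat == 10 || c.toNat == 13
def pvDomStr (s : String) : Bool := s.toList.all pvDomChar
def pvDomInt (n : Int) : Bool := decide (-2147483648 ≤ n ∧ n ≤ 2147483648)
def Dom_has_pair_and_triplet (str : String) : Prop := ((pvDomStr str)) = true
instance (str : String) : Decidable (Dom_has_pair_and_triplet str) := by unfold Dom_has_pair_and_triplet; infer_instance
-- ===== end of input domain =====

-- B replaces A's dict-count-then-key-scan by a sort-then-run-length scan (objective: alternative).

-- ===== PORT A =====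
def has_pair_and_triplet (str : String) : List Int :=
  let chars_seen := str.toList.foldl (fun d c => d.insert c (d.getD c 0 + 1))
    (PySem.Dict.empty : PySem.Dict Char Int)
  let p := chars_seen.keys.foldl (fun (acc : Int × Int) key =>
    (if chars_seen.getD key 0 == 2 && acc.1 == 0 then 1 else acc.1,
     if chars_seen.getD key 0 == 3 && acc.2 == 0 then 1 else acc.2)) (0, 0)
  [p.1, p.2]

-- ===== PORT B =====
-- the outer while loop of Source B: each step consumes one run of equal chars
-- (the inner 'while s[j] == s[i]' is the takeWhile; i := j is the dropWhile)
def pvRunLoop (s : List Char) (d t : Int) : Int × Int :=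
  match s with
  | [] => (d, t)
  | c :: rest =>
      let run : Int := 1 + (rest.takeWhile (fun x => x == c)).length
      pvRunLoop (rest.dropWhile (fun x => x == c))
        (if run == 2 then 1 else d) (if run == 3 then 1 else t)
termination_by s.length
decreasing_by
  exact Nat.lt_succ_of_le (List.length_dropWhile_le _ _)

def has_pair_and_triplet_alt (str : String) : List Int :=
  let s := PySem.List.sorted str.toList (fun c => c) false
  let p := pvRunLoop s 0 0
  [p.1, p.2]

-- ===== PRECONDITION & SPEC =====
def Spec_has_pair_and_triplet (str : String) (out : List Int) : Prop := out = has_pair_and_triplet_alt str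
instance (str : String) (out : List Int) : Decidable (Spec_has_pair_and_triplet str out) := by unfold Spec_has_pair_and_triplet; infer_instance

-- ===== CLAIM (what is proved, stated in full; the proofs are below) =====
def Claim_equal_has_pair_and_triplet : Prop := ∀ (str : String), Dom_has_pair_and_triplet str → Spec_has_pair_and_triplet str (has_pair_and_triplet str)

-- ===== LEMMAS AND PROOFS =====

-- the common value of both programs
def pvSpecOut (l : List Char) : List Int :=
  [if ∃ c ∈ l, l.count c = 2 then 1 else 0,
   if ∃ c ∈ l, l.count c = 3 then 1 else 0]

-- A's flag-setting loop over the keys, closed form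
lemma pvALoop_eq (f : Char → Int) (ks : List Char) : ∀ (d t : Int),
    ks.foldl (fun (acc : Int × Int) key =>
      (if f key == 2 && acc.1 == 0 then 1 else acc.1,
       if f key == 3 && acc.2 == 0 then 1 else acc.2)) (d, t)
    = (if d == 0 && ks.any (fun k => f k == 2) then 1 else d,
       if t == 0 && ks.any (fun k => f k == 3) then 1 else t) := by
  induction ks with
  | nil => intro d t; simp
  | cons k ks ih =>
      intro d t
      simp only [List.foldl_cons, List.any_cons, ih]
      by_cases h2 : f k = 2 <;> by_cases h3 : f k = 3 <;>
        by_cases hd : d = 0 <;> by_cases ht : t = 0 <;>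
        simp [h2, h3, hd, ht]

-- sorted list: c does not reappear after the run of c's
lemma pv_not_mem_dropWhile {c : Char} {rest : List Char}
    (hs : (c :: rest).Pairwise (· ≤ ·)) :
    c ∉ rest.dropWhile (fun x => x == c) := by
  intro hmem
  have hp := List.pairwise_cons.mp hs
  have hsub : (rest.dropWhile (fun x => x == c)).Sublist rest := List.dropWhile_sublist _
  have hpair : (rest.dropWhile (fun x => x == c)).Pairwise (· ≤ ·) := hp.2.sublist hsub
  rcases hcons : rest.dropWhile (fun x => x == c) with _ | ⟨y, ys⟩
  · rw [hcons] at hmem; exact absurd hmem (List.not_mem_nil)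
  · have hne : rest.dropWhile (fun x => x == c) ≠ [] := by simp [hcons]
    have hpy := List.head_dropWhile_not (fun x => x == c) hne
    have hyne : y ≠ c := by
      have : ((rest.dropWhile (fun x => x == c)).head hne) = y := by simp [hcons]
      rw [this] at hpy; simpa using hpy
    have hcy : c ≤ y := hp.1 y (hsub.mem (by rw [hcons]; exact List.mem_cons_self))
    rw [hcons] at hmem hpair
    rcases List.mem_cons.mp hmem with h | h
    · exact hyne h.symm
    · have hyc : y ≤ c := (List.pairwise_cons.mp hpair).1 c h
      exact hyne (le_antisymm hyc hcy)

-- B's run loop on a sorted list, closed form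
lemma pvRunLoop_eq : ∀ (s : List Char) (d t : Int), s.Pairwise (· ≤ ·) →
    pvRunLoop s d t
    = (if ∃ c ∈ s, s.count c = 2 then 1 else d,
       if ∃ c ∈ s, s.count c = 3 then 1 else t) := by
  intro s d t
  induction s, d, t using pvRunLoop.induct with
  | case1 d t => intro _; simp [pvRunLoop]
  | case2 d t c rest run ih =>
      intro hs
      have hp := List.pairwise_cons.mp hs
      have hdwp : (rest.dropWhile (fun x => x == c)).Pairwise (· ≤ ·) :=
        hp.2.sublist (List.dropWhile_sublist _)
      have hcnot : c ∉ rest.dropWhile (fun x => x == c) := pv_not_mem_dropWhile hs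
      have hsplit : rest.takeWhile (fun x => x == c) ++ rest.dropWhile (fun x => x == c) = rest :=
        List.takeWhile_append_dropWhile
      have htwc : ∀ x ∈ rest.takeWhile (fun x => x == c), x = c := fun x hx => by
        simpa using List.mem_takeWhile_imp hx
      have hrestc : rest.count c = (rest.takeWhile (fun x => x == c)).length := by
        conv_lhs => rw [← hsplit]
        rw [List.count_append, List.count_eq_length.mpr (fun b hb => (htwc b hb).symm),
          List.count_eq_zero.mpr hcnot]
        omega
      have hcount_c : (c :: rest).count c = 1 + (rest.takeWhile (fun x => x == c)).length := by
        rw [List.count_cons_self, hrestc]; omega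
      have hcount_ne : ∀ x, x ≠ c → (c :: rest).count x = (rest.dropWhile (fun x => x == c)).count x := by
        intro x hx
        have hrx : rest.count x = (rest.dropWhile (fun x => x == c)).count x := by
          conv_lhs => rw [← hsplit]
          rw [List.count_append,
            List.count_eq_zero.mpr (fun hmem => hx (htwc x hmem))]
          omega
        simp [hrx, Ne.symm hx]
      have hmem_trans : ∀ n : Nat, (∃ x ∈ c :: rest, (c :: rest).count x = n) ↔
          (1 + (rest.takeWhile (fun x => x == c)).length = n ∨
           ∃ x ∈ rest.dropWhile (fun x => x == c), (rest.dropWhile (fun x => x == c)).count x = n) := by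
        intro n
        constructor
        · rintro ⟨x, hx, hcnt⟩
          rcases List.mem_cons.mp hx with rfl | hx'
          · exact Or.inl (hcount_c ▸ hcnt)
          · rw [← hsplit] at hx'
            rcases List.mem_append.mp hx' with htw | hdw
            · have : x = c := htwc x htw
              subst this
              exact Or.inl (hcount_c ▸ hcnt)
            · have hxne : x ≠ c := fun h => hcnot (h ▸ hdw)
              exact Or.inr ⟨x, hdw, by rw [← hcount_ne x hxne]; exact hcnt⟩
        · rintro (h | ⟨x, hdw, hc⟩)
          · exact ⟨c, List.mem_cons_self, hcount_c.trans h⟩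
          · have hxne : x ≠ c := fun h => hcnot (h ▸ hdw)
            exact ⟨x, List.mem_cons_of_mem _ ((List.dropWhile_sublist _).mem hdw),
              by rw [hcount_ne x hxne]; exact hc⟩
      have hrun2 : ((run == (2:Int)) = true) ↔ 1 + (rest.takeWhile (fun x => x == c)).length = 2 := by
        show ((1 + ((rest.takeWhile (fun x => x == c)).length : Int) == (2:Int)) = true) ↔ _
        simp only [beq_iff_eq]; omega
      have hrun3 : ((run == (3:Int)) = true) ↔ 1 + (rest.takeWhile (fun x => x == c)).length = 3 := by
        show ((1 + ((rest.takeWhile (fun x => x == c)).length : Int) == (3:Int)) = true) ↔ _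
        simp only [beq_iff_eq]; omega
      have h2 := (hmem_trans 2).trans (or_congr_left hrun2.symm)
      have h3 := (hmem_trans 3).trans (or_congr_left hrun3.symm)
      rw [pvRunLoop]
      refine Eq.trans (ih hdwp) ?_
      simp only [dite_eq_ite]
      rw [Prod.mk.injEq]
      refine ⟨?_, ?_⟩
      · by_cases hB : ∃ x ∈ rest.dropWhile (fun x => x == c),
            (rest.dropWhile (fun x => x == c)).count x = 2
        · rw [if_pos hB, if_pos (h2.mpr (Or.inr hB))]
        · by_cases hr : (run == (2:Int)) = true
          · rw [if_neg hB, if_pos hr, if_pos (h2.mpr (Or.inl hr))]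
          · rw [if_neg hB, if_neg hr, if_neg (fun hcons => ((h2.mp hcons).elim hr hB))]
      · by_cases hB : ∃ x ∈ rest.dropWhile (fun x => x == c),
            (rest.dropWhile (fun x => x == c)).count x = 3
        · rw [if_pos hB, if_pos (h3.mpr (Or.inr hB))]
        · by_cases hr : (run == (3:Int)) = true
          · rw [if_neg hB, if_pos hr, if_pos (h3.mpr (Or.inl hr))]
          · rw [if_neg hB, if_neg hr, if_neg (fun hcons => ((h3.mp hcons).elim hr hB))]

lemma pvA_eq (str : String) : has_pair_and_triplet str = pvSpecOut str.toList := by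
  unfold has_pair_and_triplet pvSpecOut
  dsimp only
  rw [PySem.Dict.foldl_insert_getD_add_one_eq_counter]
  rw [pvALoop_eq (fun k => (PySem.Dict.counter str.toList).getD k 0)]
  simp [PySem.Dict.getD_counter, PySem.Dict.keys_counter, List.any_eq_true,
    PySem.Set.mem_ofList]
  constructor <;> exact if_congr (by norm_cast) rfl rfl

lemma pvB_eq (str : String) : has_pair_and_triplet_alt str = pvSpecOut str.toList := by
  unfold has_pair_and_triplet_alt pvSpecOut
  dsimp only
  have hs : (PySem.List.sorted str.toList (fun c => c) false).Pairwise (· ≤ ·) := by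
    simpa using PySem.List.sorted_pairwise str.toList (fun c => c)
  rw [pvRunLoop_eq _ 0 0 hs]
  have hperm : (PySem.List.sorted str.toList (fun c => c) false).Perm str.toList :=
    PySem.List.sorted_perm _ _ _
  have hiff : ∀ n : Nat, (∃ c ∈ PySem.List.sorted str.toList (fun c => c) false,
      (PySem.List.sorted str.toList (fun c => c) false).count c = n) ↔
      (∃ c ∈ str.toList, str.toList.count c = n) := by
    intro n
    constructor
    · rintro ⟨c, hm, hc⟩
      exact ⟨c, hperm.mem_iff.mp hm, (hperm.count_eq c) ▸ hc⟩
    · rintro ⟨c, hm, hc⟩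
      exact ⟨c, hperm.mem_iff.mpr hm, (hperm.count_eq c).trans hc⟩
  simp only [hiff 2, hiff 3]

-- ===== VERDICT (by name: the statement is the Claim_ definition above) =====
theorem has_pair_and_triplet_spec : Claim_equal_has_pair_and_triplet := by
  intro str _
  unfold Spec_has_pair_and_triplet
  rw [pvA_eq, pvB_eq]
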